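-- pv_equiv track=rewrite | github.com/easyscience/deps-pycrysfml | tools/install_optional_dependencies.py | collect_dependencies
-- ===== SOURCE A (Python) =====
-- def collect_dependencies(
--     optional_dependencies: dict[str, list[str]],
--     groups: list[str],
-- ) -> list[str]:
--     dependencies: list[str] = []
--     seen: set[str] = set()
--
--     for group in groups:
--         if group not in optional_dependencies:
--             raise SystemExit(f"Unknown optional dependency group: {group}")
--
--         for dependency in optional_dependencies[group]:
--             if dependency not in seen:
--                 dependencies.append(dependency)
--                 seen.add(dependency)
--
--     return dependencies
-- ===== SOURCE B (Python) =====
-- def collect_dependencies(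
--     optional_dependencies: dict[str, list[str]],
--     groups: list[str],
-- ) -> list[str]:
--     flat: list[str] = []
--     for group in groups:
--         if group not in optional_dependencies:
--             raise SystemExit(f"Unknown optional dependency group: {group}")
--         flat.extend(optional_dependencies[group])
--
--     # keep an element iff it does not occur earlier in the flattened list
--     return [d for i, d in enumerate(flat) if d not in flat[:i]]
-- ===== Notes on version B (the rewrite author's own statement) =====
-- stated objective: alternative
-- what changed: A deduplicates online with an auxiliary seen-set updated per element; B maintains no seen structure at all: it flattens the selected lists (raising on an unknown group in the same place) and then keeps each element iff it is absent from the prefix before its position, a brute-force positional first-occurrence filter.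
import Mathlib
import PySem

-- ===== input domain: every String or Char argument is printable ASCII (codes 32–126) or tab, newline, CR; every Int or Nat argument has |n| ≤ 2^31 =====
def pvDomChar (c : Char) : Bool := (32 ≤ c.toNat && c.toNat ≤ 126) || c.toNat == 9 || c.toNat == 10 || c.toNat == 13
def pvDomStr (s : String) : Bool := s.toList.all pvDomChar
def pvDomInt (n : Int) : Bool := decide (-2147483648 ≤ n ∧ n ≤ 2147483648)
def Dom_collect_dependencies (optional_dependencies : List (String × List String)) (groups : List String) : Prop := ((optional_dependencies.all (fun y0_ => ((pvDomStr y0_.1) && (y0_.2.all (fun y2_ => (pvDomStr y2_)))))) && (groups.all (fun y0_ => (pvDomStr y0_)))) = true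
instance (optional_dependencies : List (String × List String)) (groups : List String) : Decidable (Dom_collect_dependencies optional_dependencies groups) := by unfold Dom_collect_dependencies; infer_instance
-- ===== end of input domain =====

-- B replaces A's online seen-set dedup by a flatten pass plus a positional first-occurrence
-- filter (keep d iff d ∉ flat[:i]); equivalence is claimed on inputs where every group is a
-- known key (elsewhere both Pythons raise SystemExit).
-- ===== PORT A =====
-- A's outer loop: recursion over groups carrying (dependencies, seen); an unknown group is
-- Python's 'raise SystemExit' (outside Pre_; the port stops and returns the list built so far).
def collect_dependencies_loopA (optional_dependencies : List (String × List String))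
    (gs : List String) (deps : List String) (seen : PySem.Set String) : List String :=
  match gs with
  | [] => deps
  | g :: rest =>
    match optional_dependencies.find? (fun p => p.1 == g) with
    | none => deps  -- raise SystemExit
    | some p =>
      let st := p.2.foldl
        (fun (st : List String × PySem.Set String) d =>
          if PySem.Set.contains st.2 d then st else (st.1 ++ [d], PySem.Set.add st.2 d))
        (deps, seen)
      collect_dependencies_loopA optional_dependencies rest st.1 st.2

def collect_dependencies (optional_dependencies : List (String × List String)) (groups : List String) : List String :=
  collect_dependencies_loopA optional_dependencies groups [] PySem.Set.empty

-- ===== PORT B =====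
-- B's flattening loop (flat.extend(optional_dependencies[group])); an unknown group is
-- Python's 'raise SystemExit' (outside Pre_; the port stops with the list built so far).
def collect_dependencies_altFlat (optional_dependencies : List (String × List String))
    (gs : List String) (flat : List String) : List String :=
  match gs with
  | [] => flat
  | g :: rest =>
    match optional_dependencies.find? (fun p => p.1 == g) with
    | none => flat  -- raise SystemExit
    | some p => collect_dependencies_altFlat optional_dependencies rest (flat ++ p.2)

def collect_dependencies_alt (optional_dependencies : List (String × List String)) (groups : List String) : List String :=
  let flat := collect_dependencies_altFlat optional_dependencies groups []
  -- [d for i, d in enumerate(flat) if d not in flat[:i]]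
  ((PySem.List.enumerate flat).filter
    (fun p => !((PySem.List.slice flat none (some p.1)).contains p.2))).map Prod.snd

-- ===== PRECONDITION & SPEC =====
-- Pre_: every requested group is a key of the mapping; on other inputs both Pythons raise SystemExit.
def Pre_collect_dependencies (optional_dependencies : List (String × List String)) (groups : List String) : Prop :=
  ∀ g ∈ groups, g ∈ optional_dependencies.map Prod.fst

instance (optional_dependencies : List (String × List String)) (groups : List String) : Decidable (Pre_collect_dependencies optional_dependencies groups) := by
  unfold Pre_collect_dependencies; infer_instance

def pvWitness_collect_dependencies : (List (String × List String)) × List String :=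
  ([("dev", ["pytest", "ruff"]), ("docs", ["sphinx", "ruff"])], ["docs", "dev", "docs"])

def Spec_collect_dependencies (optional_dependencies : List (String × List String)) (groups : List String) (out : List String) : Prop := out = collect_dependencies_alt optional_dependencies groups
instance (optional_dependencies : List (String × List String)) (groups : List String) (out : List String) : Decidable (Spec_collect_dependencies optional_dependencies groups out) := by unfold Spec_collect_dependencies; infer_instance

-- ===== CLAIM (what is proved, stated in full; the proofs are below) =====
def Claim_equal_collect_dependencies : Prop := ∀ (optional_dependencies : List (String × List String)) (groups : List String), Dom_collect_dependencies optional_dependencies groups → Pre_collect_dependencies optional_dependencies groups → Spec_collect_dependencies optional_dependencies groups (collect_dependencies optional_dependencies groups)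

-- ===== LEMMAS AND PROOFS =====

-- A's inner loop keeps the diagonal invariant seen = dependencies (both grow by the same
-- append), and each step on the diagonal IS PySem.Set.add.
theorem loopA_inner_diag (xs : List String) (s : List String) :
    xs.foldl
      (fun (st : List String × PySem.Set String) d =>
        if PySem.Set.contains st.2 d then st else (st.1 ++ [d], PySem.Set.add st.2 d))
      (s, s)
    = (xs.foldl PySem.Set.add s, xs.foldl PySem.Set.add s) := by
  induction xs generalizing s with
  | nil => rfl
  | cons d xs ih =>
    simp only [List.foldl_cons]
    rw [show (if PySem.Set.contains s d then (s, s)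
          else (s ++ [d], PySem.Set.add s d)) = (PySem.Set.add s d, PySem.Set.add s d) by
        simp only [PySem.Set.add]; split <;> simp_all]
    exact ih _

-- A's outer loop, on the diagonal and with every group found, folds Set.add over the flattening.
theorem loopA_eq_foldl_flatMap (od : List (String × List String)) (gs : List String)
    (h : ∀ g ∈ gs, g ∈ od.map Prod.fst) (s : List String) :
    collect_dependencies_loopA od gs s s
    = (gs.flatMap (fun g => ((od.find? (fun p => p.1 == g)).map (·.2)).getD [])).foldl
        PySem.Set.add s := by
  induction gs generalizing s with
  | nil => rfl
  | cons g gs ih =>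
    have hg : g ∈ od.map Prod.fst := h g (List.mem_cons_self ..)
    obtain ⟨p, hp, hpe⟩ := List.exists_of_mem_map hg
    have hfind : (od.find? (fun p => p.1 == g)).isSome := by
      apply List.find?_isSome.mpr
      exact ⟨p, hp, by simp [hpe]⟩
    obtain ⟨q, hq⟩ := Option.isSome_iff_exists.mp hfind
    simp only [collect_dependencies_loopA, hq, List.flatMap_cons, List.foldl_append]
    rw [loopA_inner_diag]
    simp
    exact ih (fun g' hg' => h g' (List.mem_cons_of_mem _ hg')) _

-- B's flattening loop, with every group found, is the flattening.
theorem altFlat_eq_flatMap (od : List (String × List String)) (gs : List String)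
    (h : ∀ g ∈ gs, g ∈ od.map Prod.fst) (acc : List String) :
    collect_dependencies_altFlat od gs acc
    = acc ++ gs.flatMap (fun g => ((od.find? (fun p => p.1 == g)).map (·.2)).getD []) := by
  induction gs generalizing acc with
  | nil => simp only [collect_dependencies_altFlat, List.flatMap_nil, List.append_nil]
  | cons g gs ih =>
    obtain ⟨p, hp, hpe⟩ := List.exists_of_mem_map (h g (List.mem_cons_self ..))
    have hfind : (od.find? (fun p => p.1 == g)).isSome := by
      apply List.find?_isSome.mpr
      exact ⟨p, hp, by simp [hpe]⟩
    obtain ⟨q, hq⟩ := Option.isSome_iff_exists.mp hfind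
    simp only [collect_dependencies_altFlat, hq, List.flatMap_cons]
    rw [ih (fun g' hg' => h g' (List.mem_cons_of_mem _ hg'))]
    simp

-- The positional first-occurrence filter, generalized: over a suffix l placed after a prefix
-- pre, with any accumulated set s having the same members as pre, it computes foldl Set.add.
theorem firstOcc_gen (l : List String) : ∀ (pre s : List String),
    (∀ d, d ∈ s ↔ d ∈ pre) →
    s ++ ((PySem.List.enumerate l (pre.length : Int)).filter
        (fun p => !(((pre ++ l).take p.1.toNat).contains p.2))).map Prod.snd
    = l.foldl PySem.Set.add s := by
  induction l with
  | nil => simp [PySem.List.enumerate_nil]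
  | cons d r ih =>
    intro pre s hmem
    rw [PySem.List.enumerate_cons]
    have htake : ((pre ++ d :: r).take ((pre.length : Int)).toNat) = pre := by
      simp
    have hstep : List.foldl PySem.Set.add s (d :: r)
        = List.foldl PySem.Set.add (PySem.Set.add s d) r := rfl
    have hnext : ∀ d', d' ∈ PySem.Set.add s d ↔ d' ∈ pre ++ [d] := by
      intro d'
      rw [PySem.Set.mem_add]
      simp [hmem d']
    have hlen : ((pre.length : Int) + 1) = (((pre ++ [d]).length : Nat) : Int) := by
      simp
    have happ : pre ++ d :: r = (pre ++ [d]) ++ r := by simp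
    by_cases hd : d ∈ pre
    · have hc : (pre.contains d) = true := by simpa using hd
      have hpredF : (!(((pre ++ d :: r).take ((pre.length : Int)).toNat).contains d)) = false := by
        rw [htake, hc]; rfl
      rw [List.filter_cons, hpredF, if_neg Bool.false_ne_true]
      rw [hstep, hlen, happ]
      have hs : PySem.Set.add s d = s := by
        simp only [PySem.Set.add]
        rw [if_pos (by simpa [PySem.Set.contains] using (hmem d).mpr hd)]
      rw [← ih (pre ++ [d]) (PySem.Set.add s d) hnext, hs]
    · have hc : (pre.contains d) = false := by simpa using hd
      have hpredT : (!(((pre ++ d :: r).take ((pre.length : Int)).toNat).contains d)) = true := by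
        rw [htake, hc]; rfl
      rw [List.filter_cons, hpredT, if_pos rfl]
      rw [hstep, hlen, happ]
      rw [← ih (pre ++ [d]) (PySem.Set.add s d) hnext]
      have hs : PySem.Set.add s d = s ++ [d] := by
        simp only [PySem.Set.add]
        rw [if_neg]
        simpa [PySem.Set.contains] using fun h => hd ((hmem d).mp h)
      rw [hs]
      simp

-- The slice in B's predicate is a take on every index the enumerate produces.
theorem filter_slice_eq_take (l : List String) :
    (PySem.List.enumerate l).filter
        (fun p => !((PySem.List.slice l none (some p.1)).contains p.2))
    = (PySem.List.enumerate l).filter (fun p => !((l.take p.1.toNat).contains p.2)) := by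
  apply List.filter_congr
  intro p hp
  obtain ⟨k, hk, rfl⟩ := (PySem.List.mem_enumerate_iff _ _ _).mp hp
  rw [PySem.List.slice_to _ (by omega)]

-- ===== VERDICT (by name: the statement is the Claim_ definition above) =====
theorem collect_dependencies_spec : Claim_equal_collect_dependencies := by
  intro od groups _ hpre
  unfold Spec_collect_dependencies collect_dependencies collect_dependencies_alt
  rw [altFlat_eq_flatMap od groups hpre []]
  simp only [List.nil_append]
  rw [filter_slice_eq_take]
  rw [show (PySem.Set.empty : PySem.Set String) = [] from rfl]
  rw [loopA_eq_foldl_flatMap od groups hpre []]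
  have := firstOcc_gen
    (groups.flatMap (fun g => ((od.find? (fun p => p.1 == g)).map (·.2)).getD []))
    [] [] (by simp)
  simpa using this.symm
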